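-- pv_equiv track=rewrite | github.com/raven-computing/project-init | docs/generate_api_docs.py | parse_obj_text
-- ===== SOURCE A (Python) =====
-- def parse_obj_text(lines):
--     """Parses the specified lines representing the documentation main text.
--
--     Args:
--         lines: The documentation main text lines, as a list of str.
--
--     Returns:
--         The documentation main text, as a single str.
--     """
--     lines = [line[1:].strip() for line in lines]
--
--     keywords = ("Args:", "Stdout:", "Stderr:", "Returns:",
--                 "Globals:", "Examples:", "Since:", "Deprecated:")
--
--     ikeys = [i for i, line in enumerate(lines) if line in keywords]
--
--     first_key = min(ikeys) if len(ikeys) > 0 else len(lines)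
--
--     text = "\n".join(lines[:first_key])
--     return text.strip("\n")
-- ===== SOURCE B (Python) =====
-- def parse_obj_text(lines):
--     """Parses the specified lines representing the documentation main text.
--
--     Single early-terminating pass: strip each line as it is read and stop
--     at the first section keyword.
--     """
--     keywords = ("Args:", "Stdout:", "Stderr:", "Returns:",
--                 "Globals:", "Examples:", "Since:", "Deprecated:")
--     acc = []
--     for line in lines:
--         stripped = line[1:].strip()
--         if stripped in keywords:
--             break
--         acc.append(stripped)
--     return "\n".join(acc).strip("\n")
-- ===== Notes on version B (the rewrite author's own statement) =====
-- stated objective: simpler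
-- what changed: A's three passes (strip-all comprehension, keyword-index collection, min, slice, join) are fused into one early-terminating loop that strips each line as it is read, breaks at the first keyword line and joins the accumulated prefix.
import Mathlib
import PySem

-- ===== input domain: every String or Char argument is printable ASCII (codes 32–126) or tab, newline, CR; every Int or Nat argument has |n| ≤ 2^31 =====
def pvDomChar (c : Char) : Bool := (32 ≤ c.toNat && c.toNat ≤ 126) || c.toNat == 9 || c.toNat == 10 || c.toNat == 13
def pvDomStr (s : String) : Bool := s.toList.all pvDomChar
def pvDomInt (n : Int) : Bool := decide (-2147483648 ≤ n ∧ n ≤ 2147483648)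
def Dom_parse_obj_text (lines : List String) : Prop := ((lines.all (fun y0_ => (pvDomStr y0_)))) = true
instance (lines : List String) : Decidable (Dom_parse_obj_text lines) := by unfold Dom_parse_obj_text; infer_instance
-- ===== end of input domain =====

-- B fuses A's strip-all / collect-keyword-indices / min / slice / join passes into one
-- early-terminating loop over the raw lines (objective: simpler single pass).

-- the section keywords (a module-level tuple constant in the Python)
def pvKeywords : List String :=
  ["Args:", "Stdout:", "Stderr:", "Returns:",
   "Globals:", "Examples:", "Since:", "Deprecated:"]

-- ===== PORT A =====
def parse_obj_text (lines : List String) : String :=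
  let ls := lines.map (fun line => PySem.Str.strip (PySem.Str.slice line (some 1) none))
  let ikeys := ((PySem.List.enumerate ls).filter (fun p => pvKeywords.contains p.2)).map (·.1)
  let first_key : Int :=
    match PySem.List.min? ikeys (fun x => x) with
    | some m => m
    | none => (ls.length : Int)
  let text := PySem.Str.join "\n" (PySem.List.slice ls none (some first_key))
  PySem.Str.stripChars text "\n"

-- ===== PORT B =====
-- the loop of Source B: strip each line as it is read, break at the first keyword
def pvCollect (lines : List String) : List String :=
  match lines with
  | [] => []
  | l :: rest =>
    let stripped := PySem.Str.strip (PySem.Str.slice l (some 1) none)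
    if pvKeywords.contains stripped then [] else stripped :: pvCollect rest

def parse_obj_text_alt (lines : List String) : String :=
  PySem.Str.stripChars (PySem.Str.join "\n" (pvCollect lines)) "\n"

-- ===== PRECONDITION & SPEC =====
def Spec_parse_obj_text (lines : List String) (out : String) : Prop := out = parse_obj_text_alt lines
instance (lines : List String) (out : String) : Decidable (Spec_parse_obj_text lines out) := by unfold Spec_parse_obj_text; infer_instance

-- ===== CLAIM (what is proved, stated in full; the proofs are below) =====
def Claim_equal_parse_obj_text : Prop := ∀ (lines : List String), Dom_parse_obj_text lines → Spec_parse_obj_text lines (parse_obj_text lines)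

-- ===== LEMMAS AND PROOFS =====

-- B's loop is takeWhile-not-keyword over the stripped lines
theorem pvCollect_eq_takeWhile (lines : List String) :
    pvCollect lines
      = (lines.map (fun line => PySem.Str.strip (PySem.Str.slice line (some 1) none))).takeWhile
          (fun s => !pvKeywords.contains s) := by
  induction lines with
  | nil => rfl
  | cons l rest ih =>
    simp only [pvCollect, List.map_cons, List.takeWhile_cons]
    by_cases h : PySem.Str.strip (PySem.Str.slice l (some 1) none) ∈ pvKeywords
    · simp [h]
    · simp [h, ih]

-- every index produced by the enumerate-filter pass is ≥ the start
theorem mem_ik_ge (q : String → Bool) (ls : List String) (s x : Int)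
    (hx : x ∈ ((PySem.List.enumerate ls s).filter (fun p => q p.2)).map (·.1)) :
    s ≤ x := by
  induction ls generalizing s with
  | nil => simp [PySem.List.enumerate_nil] at hx
  | cons a rest ih =>
    rw [PySem.List.enumerate_cons] at hx
    simp only [List.filter_cons] at hx
    by_cases h : q a = true
    · simp only [h, if_pos, List.map_cons, List.mem_cons] at hx
      rcases hx with h1 | h2
      · omega
      · have := ih (s + 1) h2; omega
    · simp only [h, if_neg, Bool.false_eq_true, not_false_iff] at hx
      have := ih (s + 1) hx; omega

-- A's min-of-keyword-indices is the first keyword position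
theorem min_ik (q : String → Bool) (ls : List String) (s : Int) :
    PySem.List.min? (((PySem.List.enumerate ls s).filter (fun p => q p.2)).map (·.1)) (fun x => x)
      = if ls.any q then some (s + (ls.findIdx q : Int)) else none := by
  induction ls generalizing s with
  | nil => simp [PySem.List.enumerate_nil, PySem.List.min?_eq_none_iff]
  | cons a rest ih =>
    rw [PySem.List.enumerate_cons]
    simp only [List.filter_cons]
    by_cases h : q a = true
    · simp only [h, if_pos, List.map_cons]
      rw [PySem.List.min?_id_cons]
      have hmin : (((PySem.List.enumerate rest (s+1)).filter (fun p => q p.2)).map (·.1)).foldl min s = s := by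
        set t := ((PySem.List.enumerate rest (s+1)).filter (fun p => q p.2)).map (·.1) with ht
        rcases PySem.List.foldl_min_mem t s with heq | hmem
        · exact heq
        · have h1 := (PySem.List.foldl_min_le t s).1
          have h2 := mem_ik_ge q rest (s+1) _ hmem
          omega
      rw [hmin]
      simp [List.any_cons, h, List.findIdx_cons]
    · simp only [h, if_neg, Bool.false_eq_true, not_false_iff]
      rw [ih (s+1)]
      simp only [List.any_cons, h, Bool.false_or, List.findIdx_cons, cond_false]
      by_cases ha : rest.any q = true
      · simp only [ha, if_pos]
        congr 1
        push_cast
        ring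
      · simp [ha]
    
-- take up to the first hit = takeWhile no-hit
theorem take_findIdx_eq_takeWhile (q : String → Bool) (ls : List String) :
    ls.take (ls.findIdx q) = ls.takeWhile (fun s => !q s) := by
  induction ls with
  | nil => rfl
  | cons a rest ih =>
    by_cases h : q a = true
    · simp [List.findIdx_cons, h]
    · simp [List.findIdx_cons, h, ih]

-- A's slice up to the minimal keyword index is exactly takeWhile not-keyword
theorem sliceA_eq (q : String → Bool) (ls : List String) :
    PySem.List.slice ls none (some
      (match PySem.List.min? (((PySem.List.enumerate ls 0).filter (fun p => q p.2)).map (·.1)) (fun x => x) with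
       | some m => m
       | none => (ls.length : Int)))
      = ls.takeWhile (fun s => !q s) := by
  rw [min_ik q ls 0]
  by_cases h : ls.any q = true
  · rw [if_pos h]
    have h0 : (0 : Int) + (ls.findIdx q : Int) = (ls.findIdx q : Int) := by ring
    rw [h0]
    show PySem.List.slice ls none (some ((ls.findIdx q : Int))) = _
    rw [PySem.List.slice_to _ (Int.natCast_nonneg _)]
    rw [Int.toNat_natCast]
    exact take_findIdx_eq_takeWhile q ls
  · rw [if_neg h]
    show PySem.List.slice ls none (some ((ls.length : Int))) = _
    rw [PySem.List.slice_to _ (Int.natCast_nonneg _)]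
    rw [Int.toNat_natCast, List.take_length]
    symm
    rw [List.takeWhile_eq_self_iff]
    intro x hx
    simp only [List.any_eq_true, not_exists] at h
    push Not at h
    simp [h x hx]

-- ===== VERDICT (by name: the statement is the Claim_ definition above) =====
theorem parse_obj_text_spec : Claim_equal_parse_obj_text := by
  intro lines _
  show parse_obj_text lines = parse_obj_text_alt lines
  unfold parse_obj_text_alt
  rw [pvCollect_eq_takeWhile]
  exact congrArg (fun t => PySem.Str.stripChars (PySem.Str.join "\n" t) "\n")
    (sliceA_eq (fun y => pvKeywords.contains y)
      (lines.map (fun line => PySem.Str.strip (PySem.Str.slice line (some 1) none))))
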